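-- pv_equiv track=rewrite | github.com/szkjn/icu-surveillance-project | src/display.py | _determine_grid_layout
-- ===== SOURCE A (Python) =====
-- def _determine_grid_layout(num_eyes):
--     grid_map = {
--         **{i: (2, 2, 4 - i) for i in range(1, 5)},
--         **{i: (3, 3, 9 - i) for i in range(5, 10)},
--         **{i: (4, 4, 16 - i) for i in range(10, 17)},
--         **{i: (5, 5, 25 - i) for i in range(17, 26)}
--     }
--     return grid_map.get(num_eyes, (3, 3, 0))
-- ===== SOURCE B (Python) =====
-- def _determine_grid_layout(num_eyes):
--     # Eyes 1..25 fit in the smallest square grid of side >= 2 that holds them;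
--     # empties = side*side - num_eyes. Anything else gets the default (3, 3, 0).
--     if not 1 <= num_eyes <= 25:
--         return (3, 3, 0)
--     side = 2
--     while side * side < num_eyes:
--         side += 1
--     return (side, side, side * side - num_eyes)
-- ===== Notes on version B (the rewrite author's own statement) =====
-- stated objective: alternative
-- what changed: Instead of building a full lookup dict from four range comprehensions on every call and looking the input up, B computes the answer: it searches for the smallest grid side whose square holds num_eyes and derives the empty-cell count as side*side - num_eyes, returning the default tuple outside the supported span.
import Mathlib
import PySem

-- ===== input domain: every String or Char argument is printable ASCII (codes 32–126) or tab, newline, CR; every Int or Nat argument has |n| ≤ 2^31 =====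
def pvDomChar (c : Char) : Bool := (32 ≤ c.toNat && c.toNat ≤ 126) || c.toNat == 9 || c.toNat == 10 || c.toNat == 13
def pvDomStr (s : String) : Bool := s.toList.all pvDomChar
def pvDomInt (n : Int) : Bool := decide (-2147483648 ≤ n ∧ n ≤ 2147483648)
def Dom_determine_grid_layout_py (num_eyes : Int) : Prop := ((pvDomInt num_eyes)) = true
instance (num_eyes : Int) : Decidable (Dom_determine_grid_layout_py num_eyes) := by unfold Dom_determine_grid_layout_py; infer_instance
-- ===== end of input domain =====

-- B replaces A's per-call dict table + lookup by a search for the smallest grid side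
-- whose square holds num_eyes, deriving the empties arithmetically (objective: alternative).

-- ===== PORT A =====
-- A builds the dict by inserting (i, (r, r, sq - i)) for i over each range comprehension; ported as folds over PySem.List.pyRange.
def pvGridInsert (rr sq : Int) (d : PySem.Dict Int (Int × Int × Int)) (i : Int) :
    PySem.Dict Int (Int × Int × Int) :=
  d.insert i (rr, rr, sq - i)

def determine_grid_layout_py (num_eyes : Int) : Int × Int × Int :=
  -- grid_map = {**{i:(2,2,4-i) ...}, **{i:(3,3,9-i) ...}, **{i:(4,4,16-i) ...}, **{i:(5,5,25-i) ...}}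
  ((PySem.List.pyRange 17 26 1).foldl (pvGridInsert 5 25)
    ((PySem.List.pyRange 10 17 1).foldl (pvGridInsert 4 16)
      ((PySem.List.pyRange 5 10 1).foldl (pvGridInsert 3 9)
        ((PySem.List.pyRange 1 5 1).foldl (pvGridInsert 2 4) PySem.Dict.empty)))).getD num_eyes (3, 3, 0)

-- ===== PORT B =====
-- while side * side < num_eyes: side += 1   (fuel only makes the loop total; with
-- 1 ≤ num_eyes ≤ 25 and side starting at 2 it never runs out)
def pvSide (num_eyes : Int) : Nat → Int → Int
  | 0, side => side
  | fuel + 1, side => if side * side < num_eyes then pvSide num_eyes fuel (side + 1) else side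

def determine_grid_layout_py_alt (num_eyes : Int) : Int × Int × Int :=
  if ¬ (1 ≤ num_eyes ∧ num_eyes ≤ 25) then (3, 3, 0)
  else
    let side := pvSide num_eyes 25 2
    (side, side, side * side - num_eyes)

-- ===== PRECONDITION & SPEC =====
def Spec_determine_grid_layout_py (num_eyes : Int) (out : Int × Int × Int) : Prop := out = determine_grid_layout_py_alt num_eyes
instance (num_eyes : Int) (out : Int × Int × Int) : Decidable (Spec_determine_grid_layout_py num_eyes out) := by unfold Spec_determine_grid_layout_py; infer_instance

-- ===== CLAIM (what is proved, stated in full; the proofs are below) =====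
def Claim_equal_determine_grid_layout_py : Prop := ∀ (num_eyes : Int), Dom_determine_grid_layout_py num_eyes → Spec_determine_grid_layout_py num_eyes (determine_grid_layout_py num_eyes)

-- ===== LEMMAS AND PROOFS =====

-- Folding pvGridInsert over a key list: lookup hits iff the key was inserted, value depends only on the key.
theorem getD_fold_pvGridInsert (l : List Int) (rr sq : Int) (d : PySem.Dict Int (Int × Int × Int))
    (n : Int) (v : Int × Int × Int) :
    (l.foldl (pvGridInsert rr sq) d).getD n v =
      if n ∈ l then (rr, rr, sq - n) else d.getD n v := by
  induction l generalizing d with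
  | nil => simp
  | cons x xs ih =>
    simp only [List.foldl_cons, ih, List.mem_cons]
    by_cases hx : n ∈ xs
    · simp [hx]
    · simp only [hx, if_false, or_false]
      rw [pvGridInsert, PySem.Dict.getD_insert]
      by_cases hnx : n = x
      · subst hnx; simp
      · simp [hnx]

theorem pvSide_succ (n : Int) (f : Nat) (s : Int) :
    pvSide n (f + 1) s = if s * s < n then pvSide n f (s + 1) else s := rfl

theorem grid_eq (n : Int) : determine_grid_layout_py n = determine_grid_layout_py_alt n := by
  unfold determine_grid_layout_py determine_grid_layout_py_alt
  simp only [getD_fold_pvGridInsert, PySem.List.mem_pyRange_one, PySem.Dict.getD_empty]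
  by_cases h1 : 1 ≤ n ∧ n < 5
  · have hside : pvSide n 25 2 = 2 := by
      rw [show (25 : Nat) = 24 + 1 from rfl, pvSide_succ, if_neg (by omega)]
    simp only [hside]
    split_ifs <;> first | rfl | (exfalso; omega) | simp
  · by_cases h2 : 5 ≤ n ∧ n < 10
    · have hside : pvSide n 25 2 = 3 := by
        rw [show (25 : Nat) = 24 + 1 from rfl, pvSide_succ, if_pos (by omega),
            show (24 : Nat) = 23 + 1 from rfl, pvSide_succ, if_neg (by omega)]; norm_num
      simp only [hside]
      split_ifs <;> first | rfl | (exfalso; omega) | simp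
    · by_cases h3 : 10 ≤ n ∧ n < 17
      · have hside : pvSide n 25 2 = 4 := by
          rw [show (25 : Nat) = 24 + 1 from rfl, pvSide_succ, if_pos (by omega),
              show (24 : Nat) = 23 + 1 from rfl, pvSide_succ, if_pos (by omega),
              show (23 : Nat) = 22 + 1 from rfl, pvSide_succ, if_neg (by omega)]; norm_num
        simp only [hside]
        split_ifs <;> first | rfl | (exfalso; omega) | simp
      · by_cases h4 : 17 ≤ n ∧ n < 26
        · have hside : pvSide n 25 2 = 5 := by
            rw [show (25 : Nat) = 24 + 1 from rfl, pvSide_succ, if_pos (by omega),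
                show (24 : Nat) = 23 + 1 from rfl, pvSide_succ, if_pos (by omega),
                show (23 : Nat) = 22 + 1 from rfl, pvSide_succ, if_pos (by omega),
                show (22 : Nat) = 21 + 1 from rfl, pvSide_succ, if_neg (by omega)]; norm_num
          simp only [hside]
          split_ifs <;> first | rfl | (exfalso; omega) | simp
        · rw [if_neg (by omega), if_neg (by omega), if_neg (by omega), if_neg (by omega),
              if_pos (by omega)]

-- ===== VERDICT (by name: the statement is the Claim_ definition above) =====
theorem determine_grid_layout_py_spec : Claim_equal_determine_grid_layout_py := by
  intro n _
  exact grid_eq n
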